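-- pv_equiv track=rewrite | github.com/pierfrancescomartinello/IT-DC-Portfolio | plotting.py | levenshtein_decoder
-- ===== SOURCE A (Python) =====
-- def levenshtein_decoder(number_str):
--     c = 0
--     n = 1
--     number = ["1"]
--
--     # decoding == True -> decoding
--     # decoding == False -> reading
--     decoding = True
--
--     for i in number_str:
--         if decoding:
--             if i == "1":
--                 c += 1
--             else:
--                 if c == 0:
--                     yield "0"
--                 elif c == 1:
--                     yield "1"
--                     c = 0
--                 else:
--                     decoding = False
--                     c -= 1
--         else: # if not decoding:
--             if n > 1:
--                 number.append(i)
--                 n -= 1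
--             else: # elif n > 0:
--                 number.append(i)
--
--                 # If this is the last iteration for the c counter.
--                 if c == 1:
--                     yield "".join(number)
--                     decoding = True
--                     n = 1
--                 else:
--                     n = int("".join(number), 2)
--
--                 number = ["1"]
--                 c -= 1
-- ===== SOURCE B (Python) =====
-- def levenshtein_decoder(number_str):
--     it = iter(number_str)
--     while True:
--         # count consecutive '1's up to the '0' delimiter
--         c = 0
--         while True:
--             try:
--                 ch = next(it)
--             except StopIteration:
--                 return
--             if ch == "1":
--                 c += 1
--             else:
--                 break
--         if c == 0:
--             yield "0"
--         elif c == 1: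
--             yield "1"
--         else:
--             c -= 1
--             n = 1
--             while True:
--                 bits = ["1"]
--                 try:
--                     for _ in range(n):
--                         bits.append(next(it))
--                 except StopIteration:
--                     return
--                 if c == 1:
--                     yield "".join(bits)
--                     break
--                 n = int("".join(bits), 2)
--                 c -= 1
-- ===== Notes on version B (the rewrite author's own statement) =====
-- stated objective: alternative
-- what changed: A decodes with a single for-loop over characters driving a mode-flag state machine; B restructures it as an explicit iterator with nested loops per code: an inner loop counts consecutive '1's, then an inner group loop reads N bits at a time, ending on StopIteration exactly where A's loop runs out.
-- outside the precondition, e.g. on levenshtein_decoder('111!'): A returns [], B returns []; on levenshtein_decoder('1110ab'): A raises ValueError, B raises ValueError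
import Mathlib
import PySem

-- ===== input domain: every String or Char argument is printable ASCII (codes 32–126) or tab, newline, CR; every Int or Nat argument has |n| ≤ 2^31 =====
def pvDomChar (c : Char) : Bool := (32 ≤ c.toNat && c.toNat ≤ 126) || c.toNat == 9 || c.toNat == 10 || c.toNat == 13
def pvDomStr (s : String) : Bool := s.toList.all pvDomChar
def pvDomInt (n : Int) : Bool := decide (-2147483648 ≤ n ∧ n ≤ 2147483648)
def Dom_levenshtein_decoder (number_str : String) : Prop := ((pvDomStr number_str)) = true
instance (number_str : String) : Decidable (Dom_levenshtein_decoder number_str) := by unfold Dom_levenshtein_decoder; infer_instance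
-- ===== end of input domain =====

-- B restructures A's one-pass mode-flag state machine into an explicit iterator with nested
-- loops per code (count the '1'-run, then read bit groups); same cost, proved equal on Pre_.

-- int(s, 2): exact for the strings both programs feed it under Pre_ ('1' followed by '0'/'1' chars)
def pvBits (l : List Char) : Nat :=
  l.foldl (fun a ch => 2 * a + (if ch = '1' then 1 else 0)) 0

-- ===== PORT A =====
-- one step of A's for-loop; state = (c, n, number, decoding, out-so-far)
def lvAStep (st : Int × Int × List Char × Bool × List String) (i : Char) :
    Int × Int × List Char × Bool × List String :=
  match st with
  | (c, n, number, decoding, out) =>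
    if decoding then
      if i = '1' then (c + 1, n, number, decoding, out)
      else if c = 0 then (c, n, number, decoding, out ++ ["0"])
      else if c = 1 then (0, n, number, decoding, out ++ ["1"])
      else (c - 1, n, number, false, out)
    else
      if n > 1 then (c, n - 1, number ++ [i], decoding, out)
      else
        let number' := number ++ [i]
        if c = 1 then (c - 1, 1, ['1'], true, out ++ [String.ofList number'])
        else (c - 1, (pvBits number' : Int), ['1'], false, out)

def levenshtein_decoder (number_str : String) : List String :=
  (number_str.toList.foldl lvAStep (0, 1, ['1'], true, [])).2.2.2.2

-- ===== PORT B =====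
-- inner loop counting consecutive '1's; none = iterator exhausted mid-count (generator ends)
def lvBCount (c : Nat) : List Char → Nat × Option (List Char)
  | [] => (c, none)
  | ch :: rest => if ch = '1' then lvBCount (c + 1) rest else (c, some rest)

-- the `for _ in range(n): bits.append(next(it))` reads; none = StopIteration mid-group
def lvBTake (n : Nat) (chars : List Char) : Option (List Char × List Char) :=
  match n, chars with
  | 0, chars => some ([], chars)
  | _ + 1, [] => none
  | n + 1, ch :: rest => (lvBTake n rest).map (fun p => (ch :: p.1, p.2))

-- B's inner `while True` group loop; `c ≤ 1` is Python's `c == 1` (callers keep 1 ≤ c;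
-- stated with ≤ so termination is by c alone)
def lvBGroup (c n : Nat) (chars : List Char) (out : List String) :
    List String × Option (List Char) :=
  match lvBTake n chars with
  | none => (out, none)
  | some (bits, rest) =>
    if c ≤ 1 then (out ++ [String.ofList ('1' :: bits)], some rest)
    else lvBGroup (c - 1) (pvBits ('1' :: bits)) rest out
termination_by c
decreasing_by omega

-- termination facts for B's outer loop (cited by lvBMain's decreasing_by)
theorem lvBCount_some_length (chars : List Char) : ∀ (c c' : Nat) (rest : List Char),
    lvBCount c chars = (c', some rest) → rest.length < chars.length := by
  induction chars with
  | nil => intro c c' rest h; simp [lvBCount] at h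
  | cons ch tl ih =>
    intro c c' rest h
    simp only [lvBCount] at h
    split at h
    · exact Nat.lt_trans (ih _ _ _ h) (by simp)
    · simp at h; simp [h.2.symm]

theorem lvBTake_some_length : ∀ (n : Nat) (chars bits rest : List Char),
    lvBTake n chars = some (bits, rest) → rest.length ≤ chars.length := by
  intro n
  induction n with
  | zero => intro chars bits rest h; simp [lvBTake] at h; simp [h.2.symm]
  | succ m ih =>
    intro chars bits rest h
    cases chars with
    | nil => simp [lvBTake] at h
    | cons ch tl =>
      simp only [lvBTake, Option.map_eq_some_iff] at h
      obtain ⟨⟨b', r'⟩, hp, he⟩ := h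
      cases he
      exact Nat.le_trans (ih tl b' r' hp) (by simp)

theorem lvBGroup_some_length (c : Nat) : ∀ (n : Nat) (chars : List Char) (out o : List String)
    (r : List Char), lvBGroup c n chars out = (o, some r) → r.length ≤ chars.length := by
  induction c using Nat.strong_induction_on with
  | _ c ih =>
    intro n chars out o r h
    rw [lvBGroup] at h
    cases ht : lvBTake n chars with
    | none => rw [ht] at h; simp at h
    | some p =>
      obtain ⟨bits, rest⟩ := p
      rw [ht] at h
      by_cases hc : c ≤ 1
      · simp [hc] at h
        obtain ⟨-, h2⟩ := h
        subst h2
        exact lvBTake_some_length n chars bits rest ht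
      · simp [hc] at h
        have h1 := ih (c - 1) (by omega) _ _ _ _ _ h
        have h2 := lvBTake_some_length n chars bits rest ht
        omega

-- B's outer `while True` loop over successive codes
def lvBMain (chars : List Char) (out : List String) : List String :=
  match h : lvBCount 0 chars with
  | (_, none) => out
  | (c, some rest) =>
    if c = 0 then lvBMain rest (out ++ ["0"])
    else if c = 1 then lvBMain rest (out ++ ["1"])
    else
      match h2 : lvBGroup (c - 1) 1 rest out with
      | (out', none) => out'
      | (out', some rest') => lvBMain rest' out'
termination_by chars.length
decreasing_by
  · exact lvBCount_some_length chars 0 _ _ h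
  · exact lvBCount_some_length chars 0 _ _ h
  · exact Nat.lt_of_le_of_lt (lvBGroup_some_length _ _ _ _ _ _ h2)
      (lvBCount_some_length chars 0 _ _ h)

def levenshtein_decoder_alt (number_str : String) : List String :=
  lvBMain number_str.toList []

-- ===== PRECONDITION & SPEC =====
-- Pre_ admits binary strings and every string without a "111" run (there int(.., 2) is never
-- reached, so any character is harmless); excluded are non-binary strings containing "111",
-- where both programs can raise ValueError from int(.., 2) at a run-dependent position — on
-- those of them that stop before an int() call both still return the same value, see the cites.
def Pre_levenshtein_decoder (number_str : String) : Prop :=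
  (number_str.toList.all (fun ch => ch == '0' || ch == '1')) = true
    ∨ PySem.Str.isIn "111" number_str = false
instance (number_str : String) : Decidable (Pre_levenshtein_decoder number_str) := by
  unfold Pre_levenshtein_decoder; infer_instance

def pvWitness_levenshtein_decoder : String := "110111001011"

def Spec_levenshtein_decoder (number_str : String) (out : List String) : Prop := out = levenshtein_decoder_alt number_str
instance (number_str : String) (out : List String) : Decidable (Spec_levenshtein_decoder number_str out) := by unfold Spec_levenshtein_decoder; infer_instance

-- ===== CLAIM (what is proved, stated in full; the proofs are below) =====
def Claim_equal_levenshtein_decoder : Prop := ∀ (number_str : String), Dom_levenshtein_decoder number_str → Pre_levenshtein_decoder number_str → Spec_levenshtein_decoder number_str (levenshtein_decoder number_str)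

-- ===== LEMMAS AND PROOFS =====

-- proof-side views of B's loops
def lvOut (st : Int × Int × List Char × Bool × List String) : List String := st.2.2.2.2

def lvBAfter (res : Nat × Option (List Char)) (out : List String) : List String :=
  match res with
  | (_, none) => out
  | (c, some rest) =>
    if c = 0 then lvBMain rest (out ++ ["0"])
    else if c = 1 then lvBMain rest (out ++ ["1"])
    else lvBCont (lvBGroup (c - 1) 1 rest out)
where
  lvBCont : List String × Option (List Char) → List String
  | (o, none) => o
  | (o, some r) => lvBMain r o

def lvBRead (c n : Nat) (acc chars : List Char) (out : List String) : List String :=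
  match lvBTake n chars with
  | none => out
  | some (bits, rest) =>
    if c = 1 then lvBMain rest (out ++ [String.ofList ('1' :: (acc ++ bits))])
    else lvBAfter.lvBCont (lvBGroup (c - 1) (pvBits ('1' :: (acc ++ bits))) rest out)

theorem lvBMain_eq (chars : List Char) (out : List String) :
    lvBMain chars out = lvBAfter (lvBCount 0 chars) out := by
  rw [lvBMain]
  split
  · next c h => rw [h]; rfl
  · next c rest h =>
    rw [h]
    simp only [lvBAfter]
    split_ifs with hc0 hc1
    · rfl
    · rfl
    · split
      · next out' h2 => rw [h2]; rfl
      · next out' rest' h2 => rw [h2]; rfl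

theorem lvBCont_group (c n : Nat) (chars : List Char) (out : List String) (hc : 1 ≤ c) :
    lvBAfter.lvBCont (lvBGroup c n chars out) = lvBRead c n [] chars out := by
  rw [lvBGroup]
  cases ht : lvBTake n chars with
  | none => simp [lvBRead, ht, lvBAfter.lvBCont]
  | some p =>
    obtain ⟨bits, rest⟩ := p
    by_cases h1 : c = 1
    · subst h1; simp [lvBRead, ht, lvBAfter.lvBCont]
    · have h2 : ¬ c ≤ 1 := by omega
      simp [lvBRead, ht, h1, h2]

theorem lvBRead_cons (c n : Nat) (acc : List Char) (ch : Char) (rest : List Char)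
    (out : List String) :
    lvBRead c (n + 1) acc (ch :: rest) out = lvBRead c n (acc ++ [ch]) rest out := by
  cases ht : lvBTake n rest with
  | none => simp [lvBRead, lvBTake, ht]
  | some p => obtain ⟨bits, r⟩ := p; simp [lvBRead, lvBTake, ht]

theorem pvBits_le (l : List Char) : ∀ a : Nat,
    a ≤ l.foldl (fun a ch => 2 * a + (if ch = '1' then 1 else 0)) a := by
  induction l with
  | nil => simp
  | cons ch tl ih =>
    intro a
    refine Nat.le_trans ?_ (ih (2 * a + (if ch = '1' then 1 else 0)))
    split <;> omega

theorem pvBits_pos (l : List Char) : 1 ≤ pvBits ('1' :: l) := by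
  simpa [pvBits] using pvBits_le l 1

-- evaluations of A's step at the states the simulation visits
theorem stepD_one (c : Nat) (out : List String) :
    lvAStep ((c : Int), 1, ['1'], true, out) '1' = (((c + 1 : Nat) : Int), 1, ['1'], true, out) := by
  simp [lvAStep]

theorem stepD_zero (ch : Char) (out : List String) (h : ch ≠ '1') :
    lvAStep (((0 : Nat) : Int), 1, ['1'], true, out) ch
      = (((0 : Nat) : Int), 1, ['1'], true, out ++ ["0"]) := by
  simp [lvAStep, h]

theorem stepD_oneC (ch : Char) (out : List String) (h : ch ≠ '1') :
    lvAStep (((1 : Nat) : Int), 1, ['1'], true, out) ch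
      = (((0 : Nat) : Int), 1, ['1'], true, out ++ ["1"]) := by
  simp [lvAStep, h]

theorem stepD_big (c : Nat) (ch : Char) (out : List String) (h : ch ≠ '1') (hc : 2 ≤ c) :
    lvAStep ((c : Int), 1, ['1'], true, out) ch
      = (((c - 1 : Nat) : Int), 1, ['1'], false, out) := by
  have h0 : c ≠ 0 := by omega
  have h1 : c ≠ 1 := by omega
  have h2 : ((c : Int)) - 1 = ((c - 1 : Nat) : Int) := by omega
  simp [lvAStep, h, h0, h1, h2]

theorem stepR_big (c n : Nat) (acc : List Char) (ch : Char) (out : List String) (hn : 2 ≤ n) :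
    lvAStep ((c : Int), (n : Int), '1' :: acc, false, out) ch
      = ((c : Int), ((n - 1 : Nat) : Int), '1' :: (acc ++ [ch]), false, out) := by
  have h1 : ((n : Int)) > 1 := by omega
  have h2 : ((n : Int)) - 1 = ((n - 1 : Nat) : Int) := by omega
  simp [lvAStep, h1, h2]

theorem stepR_last1 (acc : List Char) (ch : Char) (out : List String) :
    lvAStep (((1 : Nat) : Int), ((1 : Nat) : Int), '1' :: acc, false, out) ch
      = (((0 : Nat) : Int), 1, ['1'], true, out ++ [String.ofList ('1' :: (acc ++ [ch]))]) := by
  simp [lvAStep]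

theorem stepR_lastBig (c : Nat) (acc : List Char) (ch : Char) (out : List String) (hc : 2 ≤ c) :
    lvAStep ((c : Int), ((1 : Nat) : Int), '1' :: acc, false, out) ch
      = (((c - 1 : Nat) : Int), ((pvBits ('1' :: (acc ++ [ch])) : Nat) : Int), ['1'], false, out) := by
  have h1 : c ≠ 1 := by omega
  have h2 : ((c : Int)) - 1 = ((c - 1 : Nat) : Int) := by omega
  simp [lvAStep, h1, h2]

-- the main simulation: A's fold from a decoding state matches B's count loop,
-- and from a reading state matches B's group loop
theorem lvSim : ∀ (k : Nat) (chars : List Char), chars.length ≤ k →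
    (∀ (c : Nat) (out : List String),
      lvOut (List.foldl lvAStep ((c : Int), 1, ['1'], true, out) chars)
        = lvBAfter (lvBCount c chars) out)
    ∧ (∀ (c n : Nat) (acc : List Char) (out : List String), 1 ≤ c → 1 ≤ n →
      lvOut (List.foldl lvAStep ((c : Int), (n : Int), '1' :: acc, false, out) chars)
        = lvBRead c n acc chars out) := by
  intro k
  induction k with
  | zero =>
    intro chars hlen
    have hnil : chars = [] := by
      cases chars with
      | nil => rfl
      | cons a b => simp at hlen
    subst hnil
    constructor
    · intro c out; simp [lvOut, lvBCount, lvBAfter]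
    · intro c n acc out hc hn
      cases n with
      | zero => omega
      | succ m => simp [lvOut, lvBRead, lvBTake]
  | succ k ih =>
    intro chars hlen
    cases chars with
    | nil =>
      constructor
      · intro c out; simp [lvOut, lvBCount, lvBAfter]
      · intro c n acc out hc hn
        cases n with
        | zero => omega
        | succ m => simp [lvOut, lvBRead, lvBTake]
    | cons ch rest =>
      have hr : rest.length ≤ k := by simp at hlen; omega
      obtain ⟨ihD, ihR⟩ := ih rest hr
      constructor
      · -- decoding mode
        intro c out
        by_cases h1 : ch = '1'
        · subst h1
          rw [List.foldl_cons, stepD_one, show lvBCount c ('1' :: rest) = lvBCount (c + 1) rest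
            from by simp [lvBCount]]
          exact ihD (c + 1) out
        · rw [show lvBCount c (ch :: rest) = (c, some rest) from by simp [lvBCount, h1]]
          rcases Nat.lt_or_ge c 2 with hc2 | hc2
          · interval_cases c
            · rw [List.foldl_cons, stepD_zero ch out h1,
                show lvBAfter ((0 : Nat), some rest) out = lvBMain rest (out ++ ["0"]) from rfl,
                lvBMain_eq]
              exact ihD 0 (out ++ ["0"])
            · rw [List.foldl_cons, stepD_oneC ch out h1,
                show lvBAfter ((1 : Nat), some rest) out = lvBMain rest (out ++ ["1"]) from rfl,
                lvBMain_eq]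
              exact ihD 0 (out ++ ["1"])
          · rw [List.foldl_cons, stepD_big c ch out h1 hc2,
              show lvBAfter (c, some rest) out = lvBAfter.lvBCont (lvBGroup (c - 1) 1 rest out)
                from by simp [lvBAfter, show c ≠ 0 by omega, show c ≠ 1 by omega],
              lvBCont_group (c - 1) 1 rest out (by omega)]
            exact ihR (c - 1) 1 [] out (by omega) le_rfl
      · -- reading mode
        intro c n acc out hc hn
        rcases Nat.lt_or_ge n 2 with hn2 | hn2
        · have hn1 : n = 1 := by omega
          subst hn1
          by_cases hc1 : c = 1
          · subst hc1
            rw [List.foldl_cons, stepR_last1 acc ch out,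
              show lvBRead 1 1 acc (ch :: rest) out
                  = lvBMain rest (out ++ [String.ofList ('1' :: (acc ++ [ch]))])
                from by simp [lvBRead, lvBTake],
              lvBMain_eq]
            exact ihD 0 (out ++ [String.ofList ('1' :: (acc ++ [ch]))])
          · have hc2 : 2 ≤ c := by omega
            rw [List.foldl_cons, stepR_lastBig c acc ch out hc2,
              show lvBRead c 1 acc (ch :: rest) out
                  = lvBAfter.lvBCont
                      (lvBGroup (c - 1) (pvBits ('1' :: (acc ++ [ch]))) rest out)
                from by simp [lvBRead, lvBTake, hc1],
              lvBCont_group (c - 1) _ rest out (by omega)]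
            exact ihR (c - 1) (pvBits ('1' :: (acc ++ [ch]))) [] out (by omega)
              (pvBits_pos (acc ++ [ch]))
        · have hn' : n = (n - 1) + 1 := by omega
          rw [List.foldl_cons, stepR_big c n acc ch out hn2, hn', lvBRead_cons]
          exact ihR c (n - 1) (acc ++ [ch]) out hc (by omega)

-- ===== VERDICT (by name: the statement is the Claim_ definition above) =====
theorem levenshtein_decoder_spec : Claim_equal_levenshtein_decoder := by
  intro s _ _
  unfold Spec_levenshtein_decoder levenshtein_decoder levenshtein_decoder_alt
  have h := (lvSim s.toList.length s.toList le_rfl).1 0 []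
  simp only [Nat.cast_zero] at h
  rw [lvBMain_eq]
  exact h
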